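-- pv_equiv track=rewrite | github.com/BrueggenTI/Innovation-Catalogue-Azure | nutriscore_mapper.py | extract_nutriscore_from_text
-- ===== SOURCE A (Python) =====
-- def extract_nutriscore_from_text(text):
--     """
--     Extracts Nutri-Score from text patterns like "Nutri-Score: C" or just "C"
--
--     Args:
--         text: String containing Nutri-Score information
--
--     Returns:
--         str: The Nutri-Score letter (A-E) or None
--     """
--     if not text:
--         return None
--
--     text = str(text).upper().strip()
--
--     # Check for valid Nutri-Score values
--     valid_scores = ['A', 'B', 'C', 'D', 'E']
--
--     # Direct match
--     if text in valid_scores: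
--         return text
--
--     # Search for pattern in text
--     for score in valid_scores:
--         if score in text:
--             return score
--
--     return None
-- ===== SOURCE B (Python) =====
-- def extract_nutriscore_from_text(text):
--     """Simpler: collect the Nutri-Score letters present and take the alphabetical minimum."""
--     if not text:
--         return None
--     t = str(text).upper().strip()
--     present = {c for c in t if c in "ABCDE"}
--     return min(present) if present else None
-- ===== Notes on version B (the rewrite author's own statement) =====
-- stated objective: simpler
-- what changed: Replaces A's ordered early-return substring scan over ['A'..'E'] (plus its redundant direct-match branch) with one set comprehension collecting the score letters present in the text and a min-reduction, which reproduces A's priority because it is exactly alphabetical.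
import Mathlib
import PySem

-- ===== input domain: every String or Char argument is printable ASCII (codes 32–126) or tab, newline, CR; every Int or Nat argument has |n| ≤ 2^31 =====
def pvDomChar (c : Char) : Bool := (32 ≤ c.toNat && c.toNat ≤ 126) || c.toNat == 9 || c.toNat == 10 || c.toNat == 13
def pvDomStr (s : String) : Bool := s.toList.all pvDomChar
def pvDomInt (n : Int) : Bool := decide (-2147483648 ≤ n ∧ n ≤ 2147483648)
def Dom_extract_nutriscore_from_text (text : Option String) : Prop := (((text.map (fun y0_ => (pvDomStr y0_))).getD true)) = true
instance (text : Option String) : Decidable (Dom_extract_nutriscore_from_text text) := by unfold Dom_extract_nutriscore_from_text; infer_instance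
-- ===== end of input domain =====

-- B replaces A's ordered early-return scan over ['A'..'E'] by collecting the score letters
-- present and taking their alphabetical minimum (objective: simpler).


-- ===== PORT A =====
def extract_nutriscore_from_text (text : Option String) : Option String :=
  match text with
  | none => none                                     -- `if not text: return None` (None case)
  | some s =>
    if s = "" then none                              -- `if not text: return None` (empty string)
    else
      let t := PySem.Str.strip (PySem.Str.upper s)   -- text = str(text).upper().strip()
      let valid_scores := ["A", "B", "C", "D", "E"]
      if t ∈ valid_scores then some t                -- direct match
      else
        -- for score in valid_scores: if score in text: return score  /  return None
        valid_scores.find? (fun score => PySem.Str.isIn score t)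

-- ===== PORT B =====
def extract_nutriscore_from_text_alt (text : Option String) : Option String :=
  match text with
  | none => none
  | some s =>
    if s = "" then none
    else
      let t := PySem.Str.strip (PySem.Str.upper s)
      -- present = {c for c in t if c in "ABCDE"}
      let present := PySem.Set.ofList (t.toList.filter (fun c => c ∈ (['A','B','C','D','E'] : List Char)))
      -- return min(present) if present else None
      match PySem.List.min? present (fun c => c) with
      | none => none
      | some c => some (String.mk [c])

-- ===== PRECONDITION & SPEC =====
def Spec_extract_nutriscore_from_text (text : Option String) (out : Option String) : Prop := out = extract_nutriscore_from_text_alt text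
instance (text : Option String) (out : Option String) : Decidable (Spec_extract_nutriscore_from_text text out) := by unfold Spec_extract_nutriscore_from_text; infer_instance

-- ===== CLAIM (what is proved, stated in full; the proofs are below) =====
def Claim_equal_extract_nutriscore_from_text : Prop := ∀ (text : Option String), Dom_extract_nutriscore_from_text text → Spec_extract_nutriscore_from_text text (extract_nutriscore_from_text text)

-- ===== LEMMAS AND PROOFS =====

-- `'X' in t` for a one-letter needle is just character membership
theorem isIn_singleton (c : Char) (l : List Char) :
    PySem.Chars.isIn [c] l = decide (c ∈ l) := by
  by_cases h : c ∈ l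
  · simp [h, (PySem.Chars.isIn_iff_infix [c] l).2 ((List.singleton_infix_iff c l).2 h)]
  · simp [h, (PySem.Chars.isIn_eq_false_iff [c] l).2
      (fun hinf => h ((List.singleton_infix_iff c l).1 hinf))]

-- min? pinned by a strictly-least member
theorem min?_eq_some_of_strict (l : List Char) (m : Char) (hm : m ∈ l)
    (hs : ∀ y ∈ l, y ≠ m → m < y) : PySem.List.min? l (fun c => c) = some m := by
  cases h : PySem.List.min? l (fun c => c) with
  | none =>
    obtain rfl := (PySem.List.min?_eq_none_iff l (fun c => c)).1 h
    simp at hm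
  | some m' =>
    have hmem := PySem.List.min?_mem h
    have hle := PySem.List.min?_isMin h m hm
    by_cases he : m' = m
    · rw [he]
    · exact absurd hle (not_le.2 (hs m' hmem he))

-- the B-side value when c is the least score letter occurring in t's characters
theorem bside (tl : List Char) (c : Char) (hc : c ∈ tl) (hcL : c ∈ (['A','B','C','D','E'] : List Char))
    (hlt : ∀ d ∈ (['A','B','C','D','E'] : List Char), d ≠ c → d ∈ tl → c < d) :
    PySem.List.min? (PySem.Set.ofList (tl.filter (fun x => x ∈ (['A','B','C','D','E'] : List Char)))) (fun x => x) = some c := by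
  apply min?_eq_some_of_strict
  · exact (PySem.Set.mem_ofList _ _).2 (List.mem_filter.2 ⟨hc, by simpa using hcL⟩)
  · intro y hy hne
    have := List.mem_filter.1 ((PySem.Set.mem_ofList _ _).1 hy)
    exact hlt y (by simpa using this.2) hne this.1

-- the B-side value when no score letter occurs
theorem bside_none (tl : List Char) (h : ∀ d ∈ (['A','B','C','D','E'] : List Char), d ∉ tl) :
    PySem.List.min? (PySem.Set.ofList (tl.filter (fun x => x ∈ (['A','B','C','D','E'] : List Char)))) (fun x => x) = none := by
  have : tl.filter (fun x => x ∈ (['A','B','C','D','E'] : List Char)) = [] := by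
    apply List.filter_eq_nil_iff.2
    intro a ha hmem
    exact h a (by simpa using hmem) ha
  rw [this]
  rfl

-- core equivalence after normalisation: A's scan equals B's min over present letters
theorem core (t : String) :
    (if t ∈ ["A", "B", "C", "D", "E"] then some t
     else ["A", "B", "C", "D", "E"].find? (fun score => PySem.Str.isIn score t))
    = (match PySem.List.min? (PySem.Set.ofList (t.toList.filter (fun c => c ∈ (['A','B','C','D','E'] : List Char)))) (fun c => c) with
       | none => none
       | some c => some (String.mk [c])) := by
  have hA := isIn_singleton 'A' t.toList
  have hB := isIn_singleton 'B' t.toList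
  have hC := isIn_singleton 'C' t.toList
  have hD := isIn_singleton 'D' t.toList
  have hE := isIn_singleton 'E' t.toList
  split_ifs with hdm
  · -- direct match: t is one of the five literals; both sides compute
    fin_cases hdm <;> decide
  · by_cases mA : 'A' ∈ t.toList
    · rw [bside t.toList 'A' mA (by decide) (by intro d hd hne hdt; fin_cases hd <;> first | simp_all | decide)]
      simp [List.find?, hA, mA]
      decide
    · by_cases mB : 'B' ∈ t.toList
      · rw [bside t.toList 'B' mB (by decide) (by intro d hd hne hdt; fin_cases hd <;> first | exact absurd hdt mA | simp_all | decide)]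
        simp [List.find?, hA, hB, mA, mB]
        decide
      · by_cases mC : 'C' ∈ t.toList
        · rw [bside t.toList 'C' mC (by decide) (by intro d hd hne hdt; fin_cases hd <;> first | exact absurd hdt mA | exact absurd hdt mB | simp_all | decide)]
          simp [List.find?, hA, hB, hC, mA, mB, mC]
          decide
        · by_cases mD : 'D' ∈ t.toList
          · rw [bside t.toList 'D' mD (by decide) (by intro d hd hne hdt; fin_cases hd <;> first | exact absurd hdt mA | exact absurd hdt mB | exact absurd hdt mC | simp_all | decide)]
            simp [List.find?, hA, hB, hC, hD, mA, mB, mC, mD]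
            decide
          · by_cases mE : 'E' ∈ t.toList
            · rw [bside t.toList 'E' mE (by decide) (by intro d hd hne hdt; fin_cases hd <;> first | exact absurd hdt mA | exact absurd hdt mB | exact absurd hdt mC | exact absurd hdt mD | simp_all | decide)]
              simp [List.find?, hA, hB, hC, hD, hE, mA, mB, mC, mD, mE]
              decide
            · rw [bside_none t.toList (by intro d hd; fin_cases hd <;> assumption)]
              simp [List.find?, hA, hB, hC, hD, hE, mA, mB, mC, mD, mE]

-- ===== VERDICT (by name: the statement is the Claim_ definition above) =====
theorem extract_nutriscore_from_text_spec : Claim_equal_extract_nutriscore_from_text := by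
  intro text _
  unfold Spec_extract_nutriscore_from_text extract_nutriscore_from_text extract_nutriscore_from_text_alt
  match text with
  | none => rfl
  | some s =>
    by_cases hs : s = ""
    · simp [hs]
    · simp only [hs, if_false]
      exact core (PySem.Str.strip (PySem.Str.upper s))
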